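/- GENERATED by farm/mkstatement.py from design/units.tsv (unit `start_decoder.2c`) and the assertions of Vorbis/Spec/StartDecoder2.lean — do not edit.
   THE STATEMENT of the proof unit `start_decoder.2c`: segment 2c of `start_decoder` (22 instructions; entries 0x113ad1;
   exits 0x113b15,0x113bdc; ranges 0x113ad1-0x113b0f + 0x113bbc-0x113bd6)
   takes each of its entry assertions to one of its exit assertions (`Vorbis.Spec.StartDecoder.Seg2c`), given the contracts of its callees.
   What the names mean: Vorbis/Spec/Basic.lean (the shared hypotheses), Vorbis/Spec/StartDecoder2.lean (the assertions). The theorem to prove: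
   `theorem start_decoder_2c_ok : Vorbis.Spec.start_decoder_2c.Statement`. -/
import Vorbis.Spec.Reader
import Vorbis.Spec.StartDecoder2
namespace Vorbis.Spec.start_decoder_2c
open X86 X86.User Asan

/-- The statement of unit `start_decoder.2c`. -/
def Statement : Prop :=
  ∀ (Lay : Layout) (_hLay : Lay.hi = 0x1000000) (μ : Microarch) (_hμ : UserX.MicroOK μ) (u₀ : State)
    (_hcode : HasCodeNat Lay u₀ Vorbis.L.start_decoder.entry Vorbis.Code.code_start_decoder.nat Vorbis.L.start_decoder.size)
    (_h_get8 : ∀ (others : List Obj) (frames : List (Nat × FrameLayout)) (Blk : Block → Prop) (len : Nat), Calls Lay μ Vorbis.WayInv (Vorbis.conv u₀) Vorbis.L.get8.entry (Vorbis.Spec.get8.spec others frames Blk len)),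
    Vorbis.Spec.StartDecoder.Seg2c Lay μ u₀

end Vorbis.Spec.start_decoder_2c
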